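-- pv_equiv track=rewrite | github.com/Angela-OH/Algorithm | 프로그래머스/Lv.2/42584.py | solution
-- ===== SOURCE A (Python) =====
-- def solution(prices):
--     answer = [0 for _ in range(len(prices))]
--     stack = []
--
--     for i in range(len(prices)):
--         while stack and prices[stack[-1]] > prices[i]:
--             index = stack.pop()
--             answer[index] = i - index
--         stack.append(i)
--
--     while stack:
--         index = stack.pop()
--         answer[index] = len(prices) - index - 1
--
--     return answer
-- ===== SOURCE B (Python) =====
-- def solution(prices):
--     def span(p, rest):
--         c = 0
--         for q in rest:
--             c += 1
--             if q < p:
--                 break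
--         return c
--     return [span(prices[i], prices[i+1:]) for i in range(len(prices))]
-- ===== Notes on version B (the rewrite author's own statement) =====
-- stated objective: simpler
-- what changed: Replaced the index-stack with two pending-update loops by a direct per-element forward scan to the first strict drop, written as a comprehension over suffixes.
import Mathlib
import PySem

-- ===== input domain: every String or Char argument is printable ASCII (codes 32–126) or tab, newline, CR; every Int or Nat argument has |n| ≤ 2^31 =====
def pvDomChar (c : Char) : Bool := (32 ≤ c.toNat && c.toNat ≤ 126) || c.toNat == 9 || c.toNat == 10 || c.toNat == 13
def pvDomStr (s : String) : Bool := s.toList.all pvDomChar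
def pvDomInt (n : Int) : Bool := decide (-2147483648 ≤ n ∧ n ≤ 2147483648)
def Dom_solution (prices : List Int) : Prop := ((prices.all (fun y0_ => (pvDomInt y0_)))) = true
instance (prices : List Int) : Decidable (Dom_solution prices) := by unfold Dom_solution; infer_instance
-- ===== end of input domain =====

-- B replaces A's index stack (with its deferred updates) by a direct per-element
-- forward scan to the first strict price drop; same return value, no speed claim.

-- ===== PORT A =====
-- the `while stack and prices[stack[-1]] > prices[i]` pop loop; stack top = head.
-- All stack indices come from `range(len(prices))`, so `getD _ 0` is exact for `prices[...]`.
def solPop (prices : List Int) (i : Nat) (answer : List Int) : List Nat → List Int × List Nat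
  | [] => (answer, [])
  | idx :: rest =>
    if prices.getD idx 0 > prices.getD i 0 then
      solPop prices i (answer.set idx ((i : Int) - (idx : Int))) rest
    else (answer, idx :: rest)

def solution (prices : List Int) : List Int :=
  let n := prices.length
  let st := (List.range n).foldl
    (fun st i =>
      let st' := solPop prices i st.1 st.2
      (st'.1, i :: st'.2))
    ((List.replicate n (0 : Int)), ([] : List Nat))
  st.2.foldl (fun answer idx => answer.set idx ((n : Int) - (idx : Int) - 1)) st.1

-- ===== PORT B =====
-- `span(p, rest)`: walk `rest`, counting each step, stop at the first q < p.
def spanGo (p : Int) : List Int → Int → Int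
  | [], c => c
  | q :: rest, c => if q < p then c + 1 else spanGo p rest (c + 1)

-- the comprehension `[span(prices[i], prices[i+1:]) for i in range(len(prices))]`;
-- `i` is in range so `getD _ 0` is exact, and `prices[i+1:]` is `drop (i+1)`.
def solution_alt (prices : List Int) : List Int :=
  (List.range prices.length).map (fun i => spanGo (prices.getD i 0) (prices.drop (i + 1)) 0)

-- ===== PRECONDITION & SPEC =====
def Spec_solution (prices : List Int) (out : List Int) : Prop := out = solution_alt prices
instance (prices : List Int) (out : List Int) : Decidable (Spec_solution prices out) := by unfold Spec_solution; infer_instance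

-- ===== CLAIM (what is proved, stated in full; the proofs are below) =====
def Claim_equal_solution : Prop := ∀ (prices : List Int), Dom_solution prices → Spec_solution prices (solution prices)

-- ===== LEMMAS AND PROOFS =====

-- pop condition at step k
def pvC (prices : List Int) (k j : Nat) : Bool := prices.getD j 0 > prices.getD k 0

-- functional model of A's stack after processing indices 0..k-1
def pvStk (prices : List Int) : Nat → List Nat
  | 0 => []
  | k+1 => k :: (pvStk prices k).dropWhile (pvC prices k)

-- functional model of A's answer array after processing indices 0..k-1
def pvAns (prices : List Int) : Nat → List Int
  | 0 => List.replicate prices.length 0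
  | k+1 => ((pvStk prices k).takeWhile (pvC prices k)).foldl
      (fun a j => a.set j ((k : Int) - (j : Int))) (pvAns prices k)

-- the value A stores for an index j whose price strictly drops later
def pvD (prices : List Int) (j : Nat) : Int :=
  (((prices.drop (j+1)).findIdx (fun q => q < prices.getD j 0) : Int)) + 1

theorem solPop_eq (prices : List Int) (i : Nat) (s : List Nat) (a : List Int) :
    solPop prices i a s =
      ((s.takeWhile (pvC prices i)).foldl (fun a j => a.set j ((i : Int) - (j : Int))) a,
       s.dropWhile (pvC prices i)) := by
  induction s generalizing a with
  | nil => simp [solPop]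
  | cons idx rest ih =>
    by_cases h : prices.getD idx 0 > prices.getD i 0
    · have hc : pvC prices i idx = true := by simpa [pvC] using h
      rw [solPop, if_pos h, ih, List.takeWhile_cons, List.dropWhile_cons, hc]
      simp
    · have hc : pvC prices i idx = false := by simpa [pvC] using h
      rw [solPop, if_neg h, List.takeWhile_cons, List.dropWhile_cons, hc]
      simp

theorem fold_eq (prices : List Int) (k : Nat) :
    (List.range k).foldl
      (fun st i =>
        let st' := solPop prices i st.1 st.2
        (st'.1, i :: st'.2))
      ((List.replicate prices.length (0 : Int)), ([] : List Nat))
    = (pvAns prices k, pvStk prices k) := by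
  induction k with
  | zero => simp [pvAns, pvStk]
  | succ k ih =>
    rw [List.range_succ, List.foldl_append, ih]
    simp [solPop_eq, pvAns, pvStk]

theorem dropWhile_eq_filter {α : Type} (c : α → Bool) (l : List α)
    (h : l.Pairwise (fun a b => c b = true → c a = true)) :
    l.dropWhile c = l.filter (fun x => !c x) := by
  induction l with
  | nil => rfl
  | cons a l ih =>
    rcases List.pairwise_cons.mp h with ⟨ha, hl⟩
    by_cases hc : c a
    · simp [List.dropWhile_cons, List.filter_cons, hc, ih hl]
    · simp only [List.dropWhile_cons, List.filter_cons, hc]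
      simp only [Bool.not_false, if_pos rfl, cond_true]
      have : l.filter (fun x => !c x) = l := by
        apply List.filter_eq_self.mpr
        intro b hb
        simp only [Bool.not_eq_true']
        by_contra hcb
        exact hc (ha b hb (by simpa using hcb))
      simp [hc, this]

theorem takeWhile_eq_filter {α : Type} (c : α → Bool) (l : List α)
    (h : l.Pairwise (fun a b => c b = true → c a = true)) :
    l.takeWhile c = l.filter c := by
  induction l with
  | nil => rfl
  | cons a l ih =>
    rcases List.pairwise_cons.mp h with ⟨ha, hl⟩
    by_cases hc : c a
    · simp [List.takeWhile_cons, List.filter_cons, hc, ih hl]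
    · have : l.filter c = [] := by
        apply List.filter_eq_nil_iff.mpr
        intro b hb hcb
        exact hc (ha b hb hcb)
      simp [List.takeWhile_cons, List.filter_cons, hc, this]

theorem stk_lt (prices : List Int) (k : Nat) : ∀ j ∈ pvStk prices k, j < k := by
  induction k with
  | zero => simp [pvStk]
  | succ k ih =>
    intro j hj
    simp only [pvStk, List.mem_cons] at hj
    rcases hj with rfl | hj
    · omega
    · have := ih j ((List.dropWhile_sublist _).subset hj)
      omega

theorem stk_pairwise (prices : List Int) (k : Nat) :
    (pvStk prices k).Pairwise (· > ·) := by
  induction k with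
  | zero => simp [pvStk]
  | succ k ih =>
    simp only [pvStk, List.pairwise_cons]
    refine ⟨fun j hj => stk_lt prices k j ((List.dropWhile_sublist _).subset hj), ?_⟩
    exact ih.sublist (List.dropWhile_sublist _)

theorem stk_mem (prices : List Int) (k : Nat) : ∀ j,
    j ∈ pvStk prices k ↔
      (j < k ∧ ∀ l, j < l → l < k → prices.getD j 0 ≤ prices.getD l 0) := by
  induction k with
  | zero => intro j; simp [pvStk]
  | succ k ih =>
    intro j
    have hpw : (pvStk prices k).Pairwise
        (fun a b => pvC prices k b = true → pvC prices k a = true) := by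
      refine (stk_pairwise prices k).imp_of_mem ?_
      intro a b ha hb hab hcb
      have hb' := (ih b).mp hb
      have hak : a < k := stk_lt prices k a ha
      have : prices.getD b 0 ≤ prices.getD a 0 := hb'.2 a hab hak
      simp only [pvC, decide_eq_true_eq] at hcb ⊢
      omega
    rw [pvStk, List.mem_cons, dropWhile_eq_filter _ _ hpw, List.mem_filter]
    constructor
    · rintro (rfl | ⟨hj, hcj⟩)
      · exact ⟨by omega, fun l h1 h2 => by omega⟩
      · have hj' := (ih j).mp hj
        refine ⟨by omega, fun l h1 h2 => ?_⟩
        by_cases hlk : l = k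
        · subst hlk
          simp only [pvC, Bool.not_eq_true', decide_eq_false_iff_not] at hcj
          omega
        · exact hj'.2 l h1 (by omega)
    · rintro ⟨hjk, hmono⟩
      by_cases hjk' : j = k
      · exact Or.inl hjk'
      · refine Or.inr ⟨(ih j).mpr ⟨by omega, fun l h1 h2 => hmono l h1 (by omega)⟩, ?_⟩
        simp only [pvC, Bool.not_eq_true', decide_eq_false_iff_not]
        have := hmono k (by omega) (by omega)
        omega

theorem foldl_set_length (l : List Nat) (f : Nat → Int) (a : List Int) :
    (l.foldl (fun a i => a.set i (f i)) a).length = a.length := by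
  induction l generalizing a with
  | nil => rfl
  | cons i l ih => simp [List.foldl_cons, ih]

theorem foldl_set_getD (l : List Nat) (f : Nat → Int) (a : List Int)
    (hnd : l.Nodup) (hlen : ∀ i ∈ l, i < a.length) (j : Nat) :
    (l.foldl (fun a i => a.set i (f i)) a).getD j 0 =
      if j ∈ l then f j else a.getD j 0 := by
  induction l generalizing a with
  | nil => simp
  | cons i l ih =>
    rcases List.nodup_cons.mp hnd with ⟨hi, hl⟩
    rw [List.foldl_cons, ih _ hl (fun x hx => by
      rw [List.length_set]; exact hlen x (List.mem_cons_of_mem _ hx))]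
    by_cases hjl : j ∈ l
    · simp [hjl, List.mem_cons]
    · by_cases hji : j = i
      · subst hji
        have : j < a.length := hlen j (List.mem_cons_self ..)
        simp [hjl, List.getD_eq_getElem?_getD, List.getElem?_set_self, this]
      · simp [hjl, hji, List.getD_eq_getElem?_getD, List.getElem?_set_ne (fun h => hji h.symm)]

theorem ans_length (prices : List Int) (k : Nat) :
    (pvAns prices k).length = prices.length := by
  induction k with
  | zero => simp [pvAns]
  | succ k ih => rw [pvAns, foldl_set_length, ih]

theorem findIdx_drop_eq (prices : List Int) (j k : Nat) (hjk : j < k)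
    (hk : k < prices.length)
    (halive : ∀ l, j < l → l < k → prices.getD j 0 ≤ prices.getD l 0)
    (hdrop : prices.getD k 0 < prices.getD j 0) :
    (prices.drop (j+1)).findIdx (fun q => q < prices.getD j 0) = k - j - 1 := by
  have hlen : k - j - 1 < (prices.drop (j+1)).length := by
    rw [List.length_drop]; omega
  rw [List.findIdx_eq hlen]
  refine ⟨?_, ?_⟩
  · have hg : (prices.drop (j+1))[k - j - 1] = prices[k]'hk := by
      rw [List.getElem_drop]
      congr 1
      omega
    simp only [hg, decide_eq_true_eq]
    rwa [List.getD_eq_getElem _ _ hk] at hdrop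
  · intro m hm
    have hml : j + 1 + m < prices.length := by rw [List.length_drop] at hlen; omega
    have hg : (prices.drop (j+1))[m]'(by omega) = prices[j + 1 + m]'hml := by
      rw [List.getElem_drop]
    simp only [hg, decide_eq_false_iff_not, not_lt]
    have h1 := halive (j + 1 + m) (by omega) (by omega)
    rwa [List.getD_eq_getElem _ _ hml] at h1

theorem ans_getD (prices : List Int) : ∀ (k : Nat), k ≤ prices.length →
    ∀ j, j < prices.length →
      (pvAns prices k).getD j 0 =
        if j < k ∧ j ∉ pvStk prices k then pvD prices j else 0 := by
  intro k
  induction k with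
  | zero =>
    intro _ j hj
    simp [pvAns, pvStk, List.getD_eq_getElem?_getD, List.getElem?_replicate, hj]
  | succ k ih =>
    intro hk j hj
    have hk' : k ≤ prices.length := by omega
    have hpw : (pvStk prices k).Pairwise
        (fun a b => pvC prices k b = true → pvC prices k a = true) := by
      refine (stk_pairwise prices k).imp_of_mem ?_
      intro a b ha hb hab hcb
      have hb' := (stk_mem prices k b).mp hb
      have hak : a < k := stk_lt prices k a ha
      have : prices.getD b 0 ≤ prices.getD a 0 := hb'.2 a hab hak
      simp only [pvC, decide_eq_true_eq] at hcb ⊢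
      omega
    have hnd : ((pvStk prices k).takeWhile (pvC prices k)).Nodup :=
      List.Pairwise.imp (fun h => by omega)
        ((stk_pairwise prices k).sublist (List.takeWhile_sublist _))
    have htw : (pvStk prices k).takeWhile (pvC prices k) = (pvStk prices k).filter (pvC prices k) :=
      takeWhile_eq_filter _ _ hpw
    have hdw : (pvStk prices k).dropWhile (pvC prices k) =
        (pvStk prices k).filter (fun x => !pvC prices k x) :=
      dropWhile_eq_filter _ _ hpw
    rw [pvAns, foldl_set_getD _ _ _ hnd
      (fun i hi => by
        rw [ans_length]
        have := stk_lt prices k i ((List.takeWhile_sublist _).subset hi)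
        omega) j]
    by_cases hmem : j ∈ (pvStk prices k).takeWhile (pvC prices k)
    · rw [if_pos hmem]
      rw [htw, List.mem_filter] at hmem
      obtain ⟨hjs, hcj⟩ := hmem
      have hal := (stk_mem prices k j).mp hjs
      have hcj' : prices.getD j 0 > prices.getD k 0 := by
        unfold pvC at hcj; exact of_decide_eq_true hcj
      have hfd := findIdx_drop_eq prices j k hal.1 (by omega) hal.2 hcj'

      have hnot : j ∉ pvStk prices (k+1) := by
        rw [pvStk, List.mem_cons, hdw, List.mem_filter]
        rintro (rfl | ⟨_, hc⟩)
        · exact absurd hal.1 (lt_irrefl _)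
        · have hcf : pvC prices k j = false := by simpa using hc
          unfold pvC at hcf
          exact absurd hcj' (by simpa using of_decide_eq_false hcf)
      rw [if_pos ⟨by omega, hnot⟩]
      unfold pvD
      rw [hfd]
      have := hal.1
      push_cast
      omega
    · rw [if_neg hmem, ih hk' j hj]
      by_cases hcase : j < k + 1 ∧ j ∉ pvStk prices (k+1)
      · rw [if_pos hcase]
        obtain ⟨hjk1, hnot⟩ := hcase
        have hjk : j < k := by
          rcases Nat.lt_succ_iff_lt_or_eq.mp hjk1 with h | rfl
          · exact h
          · exact absurd (by rw [pvStk]; exact List.mem_cons_self ..) hnot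
        have hjns : j ∉ pvStk prices k := by
          intro hjs
          rw [pvStk, List.mem_cons, hdw, List.mem_filter] at hnot
          push Not at hnot
          have h2 := hnot.2 hjs
          simp only [Bool.not_eq_true', Bool.not_eq_false] at h2
          exact hmem (by rw [htw, List.mem_filter]; exact ⟨hjs, by simpa using h2⟩)
        rw [if_pos ⟨hjk, hjns⟩]
      · rw [if_neg hcase]
        push Not at hcase
        by_cases hjk1 : j < k + 1
        · have hjs1 := hcase hjk1
          rw [pvStk, List.mem_cons] at hjs1
          rcases hjs1 with rfl | hjs1
          · rw [if_neg (by intro h; omega)]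
          · have hjs : j ∈ pvStk prices k := (List.dropWhile_sublist _).subset hjs1
            rw [if_neg (by intro h; exact h.2 hjs)]
        · rw [if_neg (by intro h; omega)]

theorem spanGo_eq (p : Int) (t : List Int) (c : Int) :
    spanGo p t c = c + ((min (t.findIdx (fun q => q < p) + 1) t.length : Nat) : Int) := by
  induction t generalizing c with
  | nil => simp [spanGo]
  | cons q t ih =>
    by_cases h : q < p
    · simp [spanGo, h, List.findIdx_cons]
    · rw [spanGo, if_neg h, ih]
      simp only [List.findIdx_cons, decide_eq_true_eq, h, decide_false, cond_false,
        List.length_cons]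
      push_cast [Nat.min_def]
      split_ifs <;> omega

theorem getD_ext (a b : List Int) (hlen : a.length = b.length)
    (h : ∀ j, j < a.length → a.getD j 0 = b.getD j 0) : a = b := by
  apply List.ext_getElem hlen
  intro j h1 h2
  have := h j h1
  rwa [List.getD_eq_getElem _ _ h1, List.getD_eq_getElem _ _ h2] at this

theorem solution_eq_alt (prices : List Int) : solution prices = solution_alt prices := by
  simp only [solution]
  rw [fold_eq]
  set n := prices.length with hn
  have hlenA : ((pvStk prices n).foldl
      (fun answer idx => answer.set idx ((n : Int) - (idx : Int) - 1)) (pvAns prices n)).length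
      = n := by rw [foldl_set_length, ans_length]
  have hlenB : (solution_alt prices).length = n := by
    unfold solution_alt; simp; omega
  apply getD_ext _ _ (by rw [hlenA, hlenB])
  intro j hj
  rw [hlenA] at hj
  have hndn : (pvStk prices n).Nodup :=
    List.Pairwise.imp (fun h => by omega) (stk_pairwise prices n)
  rw [foldl_set_getD _ _ _ hndn
    (fun i hi => by rw [ans_length]; exact lt_of_lt_of_le (stk_lt prices n i hi) (le_refl n)) j]
  rw [ans_getD prices n (le_refl _) j hj]
  have hB : (solution_alt prices).getD j 0 =
      spanGo (prices.getD j 0) (prices.drop (j+1)) 0 := by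
    unfold solution_alt
    rw [List.getD_eq_getElem _ _ (by simpa using hj)]
    rw [List.getElem_map, List.getElem_range]
  rw [hB, spanGo_eq]
  have hlt : (prices.drop (j+1)).length = n - j - 1 := by rw [List.length_drop]; omega
  have hal := stk_mem prices n j
  by_cases hmem : j ∈ pvStk prices n
  · rw [if_pos hmem]
    have hal' := hal.mp hmem
    have hfull : (prices.drop (j+1)).findIdx (fun q => q < prices.getD j 0)
        = (prices.drop (j+1)).length := by
      rw [List.findIdx_eq_length]
      intro x hx
      rw [List.mem_iff_getElem] at hx
      obtain ⟨m, hm, rfl⟩ := hx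
      have hml : j + 1 + m < prices.length := by rw [List.length_drop] at hm; omega
      have hg : (prices.drop (j+1))[m]'hm = prices[j + 1 + m]'hml := List.getElem_drop ..
      rw [hg]
      simp only [decide_eq_false_iff_not, decide_eq_true_eq, not_lt]
      have h1 := hal'.2 (j + 1 + m) (by omega) (by omega)
      rwa [List.getD_eq_getElem _ _ hml] at h1
    rw [hfull, hlt]
    have hmin : min (n - j - 1 + 1) (n - j - 1) = n - j - 1 := by omega
    rw [hmin]
    omega
  · rw [if_neg hmem]
    have hex : ∃ l, j < l ∧ l < n ∧ prices.getD l 0 < prices.getD j 0 := by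
      rw [hal] at hmem
      push Not at hmem
      exact hmem hj
    obtain ⟨l, hl1, hl2, hl3⟩ := hex
    have hnotmem : j ∉ pvStk prices n := by
      rw [hal]
      rintro ⟨-, hmono⟩
      exact absurd hl3 (not_lt.mpr (hmono l hl1 hl2))
    have hdrop : (prices.drop (j+1)).findIdx (fun q => q < prices.getD j 0)
        < (prices.drop (j+1)).length := by
      rw [List.findIdx_lt_length]
      refine ⟨prices[l]'(by omega), ?_, ?_⟩
      · rw [List.mem_iff_getElem]
        refine ⟨l - j - 1, by rw [List.length_drop]; omega, ?_⟩
        rw [List.getElem_drop]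
        congr 1
        omega
      · simp only [decide_eq_true_eq]
        rwa [List.getD_eq_getElem _ _ (by omega : l < prices.length)] at hl3
    rw [if_pos ⟨hj, hnotmem⟩]
    unfold pvD
    rw [hlt] at hdrop
    have hmin : min ((prices.drop (j+1)).findIdx (fun q => q < prices.getD j 0) + 1) (n - j - 1)
        = (prices.drop (j+1)).findIdx (fun q => q < prices.getD j 0) + 1 := by omega
    rw [hlt, hmin]
    push_cast
    ring

-- ===== VERDICT (by name: the statement is the Claim_ definition above) =====
theorem solution_spec : Claim_equal_solution := by
  intro prices _
  unfold Spec_solution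
  exact solution_eq_alt prices
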